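-- pv_equiv track=rewrite | github.com/josephtam-github/Scissor | api/v1/utils/urlkit.py | id2url
-- ===== SOURCE A (Python) =====
-- salt = 3901
--
-- def id2url(num):
--     """convert the integer to a character string that is at most 6 characters long"""
--     character_map = "abcdefghijklmnopqrstuvwxyzABCDEFGHIJKLMNOPQRSTUVWXYZ0123456789"
--     short_url = ""
--     num = num + salt
--     # for each digit find the base 62
--     while num > 0:
--         short_url += character_map[num % 62]
--         num //= 62
--
--     # reversing the shortURL
--     return short_url[len(short_url):: -1]
-- ===== SOURCE B (Python) =====
-- salt = 3901
--
-- def id2url(num):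
--     """convert the integer to a character string that is at most 6 characters long"""
--     character_map = "abcdefghijklmnopqrstuvwxyzABCDEFGHIJKLMNOPQRSTUVWXYZ0123456789"
--
--     def h(n):
--         # most-significant digit first; builds the string in final order
--         if n <= 0:
--             return ""
--         return h(n // 62) + character_map[n % 62]
--
--     return h(num + salt)
-- ===== Notes on version B (the rewrite author's own statement) =====
-- stated objective: alternative
-- what changed: Replaces the LSD-first accumulate-then-reverse while loop by a most-significant-digit-first recursion that emits the string in final order with no reversal.
import Mathlib
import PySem

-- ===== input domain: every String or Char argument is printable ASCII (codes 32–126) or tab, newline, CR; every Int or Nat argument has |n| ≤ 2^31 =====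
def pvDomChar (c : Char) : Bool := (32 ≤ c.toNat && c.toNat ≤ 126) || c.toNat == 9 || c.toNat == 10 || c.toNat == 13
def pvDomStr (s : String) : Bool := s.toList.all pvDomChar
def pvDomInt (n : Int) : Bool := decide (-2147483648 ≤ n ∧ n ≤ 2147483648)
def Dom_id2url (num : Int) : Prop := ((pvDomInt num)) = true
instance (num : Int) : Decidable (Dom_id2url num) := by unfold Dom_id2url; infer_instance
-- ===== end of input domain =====

-- B replaces A's LSD-first accumulate-then-reverse loop by an MSD-first recursion that emits the string in final order (alternative decomposition, same cost).


def id2urlCharMap : List Char :=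
  "abcdefghijklmnopqrstuvwxyzABCDEFGHIJKLMNOPQRSTUVWXYZ0123456789".toList

-- ===== PORT A =====
-- the while loop: append character_map[num % 62], then num //= 62
-- (character_map[num % 62] never raises: 0 ≤ num % 62 < 62; getD ' ' is unreachable)
def id2urlLoop (num : Int) (acc : List Char) : List Char :=
  if 0 < num then
    id2urlLoop (PySem.Int.floordiv num 62)
      (acc ++ [(PySem.List.pyGet? id2urlCharMap (PySem.Int.mod num 62)).getD ' '])
  else acc
termination_by num.toNat
decreasing_by
  rw [PySem.Int.floordiv_eq_ediv_of_pos (by omega : (0:Int) < 62)]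
  omega

def id2url (num : Int) : String :=
  -- short_url[len(short_url)::-1] reverses the string (negative-step slice, start clamped)
  String.ofList (((PySem.List.slice? (id2urlLoop (num + 3901) [])
      (some ((id2urlLoop (num + 3901) []).length : Int)) none (-1)).getD []))

-- ===== PORT B =====
def id2urlAltH (n : Int) : List Char :=
  if n ≤ 0 then []
  else id2urlAltH (PySem.Int.floordiv n 62)
        ++ [(PySem.List.pyGet? id2urlCharMap (PySem.Int.mod n 62)).getD ' ']
termination_by n.toNat
decreasing_by
  rw [PySem.Int.floordiv_eq_ediv_of_pos (by omega : (0:Int) < 62)]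
  omega

def id2url_alt (num : Int) : String :=
  String.ofList (id2urlAltH (num + 3901))

-- ===== PRECONDITION & SPEC =====
def Spec_id2url (num : Int) (out : String) : Prop := out = id2url_alt num
instance (num : Int) (out : String) : Decidable (Spec_id2url num out) := by unfold Spec_id2url; infer_instance

-- ===== CLAIM (what is proved, stated in full; the proofs are below) =====
def Claim_equal_id2url : Prop := ∀ (num : Int), Dom_id2url num → Spec_id2url num (id2url num)

-- ===== LEMMAS AND PROOFS =====

-- the accumulator of A's loop is a prefix it only appends to
theorem id2urlLoop_acc (num : Int) (acc : List Char) :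
    id2urlLoop num acc = acc ++ id2urlLoop num [] := by
  by_cases h : 0 < num
  · conv_lhs => rw [id2urlLoop, if_pos h,
      id2urlLoop_acc (PySem.Int.floordiv num 62)
        (acc ++ [(PySem.List.pyGet? id2urlCharMap (PySem.Int.mod num 62)).getD ' '])]
    conv_rhs => rw [id2urlLoop, if_pos h,
      id2urlLoop_acc (PySem.Int.floordiv num 62)
        ([] ++ [(PySem.List.pyGet? id2urlCharMap (PySem.Int.mod num 62)).getD ' '])]
    simp
  · rw [id2urlLoop, if_neg h, id2urlLoop, if_neg h]
    simp
termination_by num.toNat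
decreasing_by
  all_goals
    rw [PySem.Int.floordiv_eq_ediv_of_pos (by omega : (0:Int) < 62)]
    omega

-- the slice s[len(s)::-1] is reversal
theorem slice_len_neg_one {α : Type} (xs : List α) :
    (PySem.List.slice? xs (some (xs.length : Int)) none (-1)).getD [] = xs.reverse := by
  have hidx : PySem.List.sliceIndices xs.length (some (xs.length : Int)) none (-1)
      = PySem.List.sliceIndices xs.length none none (-1) := by
    simp [PySem.List.sliceIndices]
  have h := PySem.List.slice?_none_none_neg_one (xs := xs)
  unfold PySem.List.slice? at h ⊢
  rw [hidx]
  simpa using h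

-- reversing A's digit list gives B's MSD-first list
theorem id2urlLoop_reverse (n : Int) :
    (id2urlLoop n []).reverse = id2urlAltH n := by
  induction n using id2urlAltH.induct with
  | case1 m h =>
      rw [id2urlLoop, if_neg (by omega), id2urlAltH, if_pos h]
      simp
  | case2 m h ih =>
      rw [id2urlLoop, if_pos (by omega), id2urlLoop_acc, id2urlAltH, if_neg h]
      simp only [List.nil_append, List.reverse_append, List.reverse_cons, List.reverse_nil]
      rw [ih]

-- ===== VERDICT (by name: the statement is the Claim_ definition above) =====
theorem id2url_spec : Claim_equal_id2url := by
  intro num _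
  unfold Spec_id2url id2url id2url_alt
  rw [slice_len_neg_one, id2urlLoop_reverse]
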